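-- pv_equiv track=rewrite | github.com/badooki/unbiased_tensor_algebra | u_tensor_algebra.py | expand_indicator_pairs
-- ===== SOURCE A (Python) =====
-- def expand_indicator_pairs(pairs_of_indices):
--     """
--     Given a list of pairs_of_indices = [(i1, i2), (i3, i4), ...]
--     for each pair we have factor (1 - delta_{i1, i2}),
--     expand the product into 2^len(pairs) terms.
--
--     Returns a list of (coefficient, merges)
--     where 'merges' is a list of index-equalities
--     that come from including the delta in that term.
--
--     Example: for 2 pairs (i1,i2), (a1,a2),
--        we get:
--          +1, []                       (no merges)
--          -1, [(i1, i2)]               (merging i1 and i2)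
--          -1, [(a1, a2)]
--          +1, [(i1, i2), (a1, a2)]
--     """
--     # We'll do a binary choice for each pair: either we pick "+1" (the '1' part)
--     # or we pick "-1" and the merges (the 'delta' part).
--     # This yields 2^m expansions if we have m pairs.
--     from itertools import product
--
--     terms = []
--     m = len(pairs_of_indices)
--     for subset_mask in product([False, True], repeat=m):
--         # subset_mask[i] = True means we pick the delta in the i-th pair
--         # subset_mask[i] = False means we pick the '1'
--         merges = []
--         coeff = 1
--         for pick_delta, (x, y) in zip(subset_mask, pairs_of_indices):
--             if pick_delta:
--                 # picking delta_{x,y} => coefficient is -1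
--                 # and merges = (x,y)
--                 coeff *= -1
--                 merges.append((x, y))
--             else:
--                 # picking '1' => do nothing to merges, coeff stays
--                 pass
--         terms.append( (coeff, merges) )
--     return terms
-- ===== SOURCE B (Python) =====
-- def expand_indicator_pairs(pairs_of_indices):
--     # Iterative doubling: each pair splits every existing term into
--     # (keep, c) then (delta, -c, merges+[pair]); last pair varies fastest,
--     # matching itertools.product's mask order.
--     terms = [(1, [])]
--     for (x, y) in pairs_of_indices:
--         new_terms = []
--         for (c, merges) in terms:
--             new_terms.append((c, merges))
--             new_terms.append((-c, merges + [(x, y)]))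
--         terms = new_terms
--     return terms
-- ===== Notes on version B (the rewrite author's own statement) =====
-- stated objective: alternative
-- what changed: Replaces the 2^m mask enumeration (itertools.product plus an inner zip scan per mask) by iterative doubling of the term list, splitting every term into keep/delta for each pair.
import Mathlib
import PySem

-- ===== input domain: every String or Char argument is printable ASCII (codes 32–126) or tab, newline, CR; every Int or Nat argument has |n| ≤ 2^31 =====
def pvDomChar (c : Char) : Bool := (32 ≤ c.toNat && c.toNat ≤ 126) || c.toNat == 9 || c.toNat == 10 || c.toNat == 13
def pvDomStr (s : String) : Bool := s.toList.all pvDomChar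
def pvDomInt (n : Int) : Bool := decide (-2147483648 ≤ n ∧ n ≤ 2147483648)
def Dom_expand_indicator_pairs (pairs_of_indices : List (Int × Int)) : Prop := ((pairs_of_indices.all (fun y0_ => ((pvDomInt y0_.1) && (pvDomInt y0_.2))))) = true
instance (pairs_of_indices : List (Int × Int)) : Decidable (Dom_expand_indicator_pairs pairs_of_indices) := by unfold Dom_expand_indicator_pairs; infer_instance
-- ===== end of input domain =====

-- B replaces A's 2^m mask enumeration (itertools.product + inner zip scan) by
-- iterative doubling of the term list, one pair at a time (objective: alternative).

-- ===== PORT A =====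
-- product([False, True], repeat=m): first coordinate varies slowest
def pvMasks : Nat → List (List Bool)
  | 0 => [[]]
  | n + 1 => [false, true].flatMap (fun a => (pvMasks n).map (fun m => a :: m))

-- the inner 'for pick_delta, (x, y) in zip(...)' loop on state (coeff, merges)
def pvTermFold (l : List (Bool × (Int × Int))) (acc : Int × List (Int × Int)) :
    Int × List (Int × Int) :=
  l.foldl (fun acc pd => if pd.1 then (acc.1 * (-1), acc.2 ++ [pd.2]) else acc) acc

def expand_indicator_pairs (pairs_of_indices : List (Int × Int)) :
    List (Int × (List (Int × Int))) :=
  (pvMasks pairs_of_indices.length).map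
    (fun mask => pvTermFold (mask.zip pairs_of_indices) (1, []))

-- ===== PORT B =====
-- each pair splits every existing term into (keep) then (delta)
def pvDouble (terms : List (Int × List (Int × Int))) (p : Int × Int) :
    List (Int × List (Int × Int)) :=
  terms.flatMap (fun t => [(t.1, t.2), (-t.1, t.2 ++ [p])])

def expand_indicator_pairs_alt (pairs_of_indices : List (Int × Int)) :
    List (Int × (List (Int × Int))) :=
  pairs_of_indices.foldl pvDouble [(1, [])]

-- ===== PRECONDITION & SPEC =====
def Spec_expand_indicator_pairs (pairs_of_indices : List (Int × Int)) (out : List (Int × (List (Int × Int)))) : Prop := out = expand_indicator_pairs_alt pairs_of_indices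
instance (pairs_of_indices : List (Int × Int)) (out : List (Int × (List (Int × Int)))) : Decidable (Spec_expand_indicator_pairs pairs_of_indices out) := by unfold Spec_expand_indicator_pairs; infer_instance

-- ===== CLAIM (what is proved, stated in full; the proofs are below) =====
def Claim_equal_expand_indicator_pairs : Prop := ∀ (pairs_of_indices : List (Int × Int)), Dom_expand_indicator_pairs pairs_of_indices → Spec_expand_indicator_pairs pairs_of_indices (expand_indicator_pairs pairs_of_indices)

-- ===== LEMMAS AND PROOFS =====

-- the shift applied to a term when the loop starts from (c0, ms0) instead of (1, [])
def pvShift (c0 : Int) (ms0 : List (Int × Int)) (t : Int × List (Int × Int)) :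
    Int × List (Int × Int) := (c0 * t.1, ms0 ++ t.2)

theorem pvTermFold_shift (l : List (Bool × (Int × Int))) (c0 : Int)
    (ms0 : List (Int × Int)) :
    pvTermFold l (c0, ms0) = pvShift c0 ms0 (pvTermFold l (1, [])) := by
  induction l generalizing c0 ms0 with
  | nil => simp [pvTermFold, pvShift]
  | cons hd tl ih =>
    obtain ⟨b, pr⟩ := hd
    cases b with
    | false =>
      have h1 : pvTermFold ((false, pr) :: tl) (c0, ms0) = pvTermFold tl (c0, ms0) := rfl
      have h2 : pvTermFold ((false, pr) :: tl) (1, []) = pvTermFold tl (1, []) := rfl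
      rw [h1, h2, ih]
    | true =>
      have h1 : pvTermFold ((true, pr) :: tl) (c0, ms0) =
          pvTermFold tl (c0 * (-1), ms0 ++ [pr]) := rfl
      have h2 : pvTermFold ((true, pr) :: tl) (1, []) =
          pvTermFold tl (1 * (-1), [] ++ [pr]) := rfl
      rw [h1, h2, ih, ih (1 * (-1))]
      simp only [pvShift, List.append_assoc, List.nil_append, Prod.mk.injEq]
      exact ⟨by ring, by trivial⟩

theorem pvDouble_append (L1 L2 : List (Int × List (Int × Int))) (p : Int × Int) :
    pvDouble (L1 ++ L2) p = pvDouble L1 p ++ pvDouble L2 p := by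
  simp [pvDouble]

theorem pvDouble_foldl_append (ps : List (Int × Int))
    (L1 L2 : List (Int × List (Int × Int))) :
    ps.foldl pvDouble (L1 ++ L2) = ps.foldl pvDouble L1 ++ ps.foldl pvDouble L2 := by
  induction ps generalizing L1 L2 with
  | nil => rfl
  | cons p ps ih => simp only [List.foldl_cons, pvDouble_append, ih]

theorem pvDouble_map_shift (L : List (Int × List (Int × Int))) (c0 : Int)
    (ms0 : List (Int × Int)) (p : Int × Int) :
    pvDouble (L.map (pvShift c0 ms0)) p = (pvDouble L p).map (pvShift c0 ms0) := by
  induction L with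
  | nil => rfl
  | cons t ts ih =>
    simp [pvDouble, pvShift] at *
    exact ih

theorem pvDouble_foldl_map_shift (ps : List (Int × Int))
    (L : List (Int × List (Int × Int))) (c0 : Int) (ms0 : List (Int × Int)) :
    ps.foldl pvDouble (L.map (pvShift c0 ms0)) =
      (ps.foldl pvDouble L).map (pvShift c0 ms0) := by
  induction ps generalizing L with
  | nil => rfl
  | cons p ps ih => simp only [List.foldl_cons, pvDouble_map_shift, ih]

theorem pvMasks_succ (n : Nat) :
    pvMasks (n + 1) =
      (pvMasks n).map (fun m => false :: m) ++ (pvMasks n).map (fun m => true :: m) := by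
  simp [pvMasks]

theorem expand_eq (ps : List (Int × Int)) :
    expand_indicator_pairs ps = expand_indicator_pairs_alt ps := by
  induction ps with
  | nil => rfl
  | cons p ps ih =>
    have hA : expand_indicator_pairs (p :: ps) =
        expand_indicator_pairs ps ++
          (expand_indicator_pairs ps).map (pvShift (-1) [p]) := by
      have hfalse : ((pvMasks ps.length).map (fun m => false :: m)).map
          (fun mask => pvTermFold (mask.zip (p :: ps)) (1, [])) =
          (pvMasks ps.length).map (fun mask => pvTermFold (mask.zip ps) (1, [])) := by
        rw [List.map_map]
        apply List.map_congr_left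
        intro m _
        rfl
      have htrue : ((pvMasks ps.length).map (fun m => true :: m)).map
          (fun mask => pvTermFold (mask.zip (p :: ps)) (1, [])) =
          ((pvMasks ps.length).map (fun mask => pvTermFold (mask.zip ps) (1, []))).map
            (pvShift (-1) [p]) := by
        rw [List.map_map, List.map_map]
        apply List.map_congr_left
        intro m _
        show pvTermFold ((true :: m).zip (p :: ps)) (1, []) =
          pvShift (-1) [p] (pvTermFold (m.zip ps) (1, []))
        have h1 : pvTermFold ((true :: m).zip (p :: ps)) (1, []) =
            pvTermFold (m.zip ps) (1 * (-1), [] ++ [p]) := rfl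
        rw [h1, pvTermFold_shift]
        simp only [pvShift, List.nil_append, Prod.mk.injEq]
        exact ⟨by ring, by trivial⟩
      show (pvMasks (ps.length + 1)).map (fun mask => pvTermFold (mask.zip (p :: ps)) (1, [])) = _
      rw [pvMasks_succ, List.map_append, hfalse, htrue]
      rfl
    have hB : expand_indicator_pairs_alt (p :: ps) =
        expand_indicator_pairs_alt ps ++
          (expand_indicator_pairs_alt ps).map (pvShift (-1) [p]) := by
      simp only [expand_indicator_pairs_alt, List.foldl_cons]
      have h1 : pvDouble [(1, [])] p = [((1 : Int), ([] : List (Int × Int)))] ++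
          [((-1 : Int), [p])] := by simp [pvDouble]
      rw [h1, pvDouble_foldl_append]
      congr 1
      have h2 : [((-1 : Int), [p])] =
          [((1 : Int), ([] : List (Int × Int)))].map (pvShift (-1) [p]) := by
        simp [pvShift]
      rw [h2, pvDouble_foldl_map_shift]
    rw [hA, hB, ih]
  
-- ===== VERDICT (by name: the statement is the Claim_ definition above) =====
theorem expand_indicator_pairs_spec : Claim_equal_expand_indicator_pairs := by
  intro ps _
  unfold Spec_expand_indicator_pairs
  exact expand_eq ps
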